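-- pv_equiv track=rewrite | github.com/sidprasad/prescriptive-analystics-employee-scheduling | checker.py | parse_solution_string
-- ===== SOURCE A (Python) =====
-- def parse_solution_string(sol_str, num_employees, num_days):
--     """Parse flat space-separated solution string into sched[e][d] = (begin, end)."""
--     vals = list(map(int, sol_str.split()))
--     expected = num_employees * num_days * 2
--     if len(vals) != expected:
--         raise ValueError(f"Solution has {len(vals)} values, expected {expected} ({num_employees} employees x {num_days} days x 2)")
--     sched = []
--     idx = 0
--     for e in range(num_employees):
--         row = []
--         for d in range(num_days):
--             row.append((vals[idx], vals[idx + 1]))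
--             idx += 2
--         sched.append(row)
--     return sched
-- ===== SOURCE B (Python) =====
-- def parse_solution_string(sol_str, num_employees, num_days):
--     """Parse flat space-separated solution string into sched[e][d] = (begin, end)."""
--     vals = list(map(int, sol_str.split()))
--     expected = num_employees * num_days * 2
--     if len(vals) != expected:
--         raise ValueError(f"Solution has {len(vals)} values, expected {expected} ({num_employees} employees x {num_days} days x 2)")
--     pairs = [(vals[i], vals[i + 1]) for i in range(0, len(vals), 2)]
--     return [pairs[e * num_days:(e + 1) * num_days] for e in range(num_employees)]
-- ===== Notes on version B (the rewrite author's own statement) =====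
-- stated objective: simpler
-- what changed: Replaces the nested employee/day loop that carries a running idx counter with two independent passes: first pair up the flat value list with a step-2 range comprehension, then slice that pair list into consecutive rows of num_days.
import Mathlib
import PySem

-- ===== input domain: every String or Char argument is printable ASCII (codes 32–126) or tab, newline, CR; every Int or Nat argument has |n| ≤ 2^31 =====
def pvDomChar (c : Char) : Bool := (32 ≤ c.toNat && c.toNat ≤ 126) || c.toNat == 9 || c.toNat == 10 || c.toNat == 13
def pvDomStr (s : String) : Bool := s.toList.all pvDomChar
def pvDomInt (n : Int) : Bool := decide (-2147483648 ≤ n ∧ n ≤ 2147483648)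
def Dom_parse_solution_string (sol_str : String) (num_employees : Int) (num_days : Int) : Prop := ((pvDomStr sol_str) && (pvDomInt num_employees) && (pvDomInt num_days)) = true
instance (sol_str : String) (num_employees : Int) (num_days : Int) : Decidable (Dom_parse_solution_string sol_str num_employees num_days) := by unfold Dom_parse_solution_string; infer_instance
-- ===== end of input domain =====

-- B replaces A's nested idx-advancing loop by two independent passes (pair up with a
-- step-2 range, then slice into rows of num_days); objective: simpler, same cost.


-- ===== PORT A =====
-- Literal port of A. `int(t)` is PySem.Int.ofStr?; under Pre_ every token parses, so the
-- `.getD 0` default is never taken. Where Python raises ValueError (a bad token, or the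
-- length check) the port returns [] — those inputs are outside Pre_.
def parse_solution_string (sol_str : String) (num_employees : Int) (num_days : Int) : List (List (Int × Int)) :=
  let vals : List Int := (PySem.Str.split₀ sol_str).map (fun t => (PySem.Int.ofStr? t).getD 0)
  let expected : Int := num_employees * num_days * 2
  if (vals.length : Int) ≠ expected then []   -- Python: raise ValueError (outside Pre_)
  else
    let res := (PySem.List.pyRange 0 num_employees 1).foldl
      (fun (st : List (List (Int × Int)) × Int) _e =>
        let inner := (PySem.List.pyRange 0 num_days 1).foldl
          (fun (r : List (Int × Int) × Int) _d =>
            (r.1 ++ [(PySem.List.pyGetD vals r.2 0, PySem.List.pyGetD vals (r.2 + 1) 0)], r.2 + 2))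
          (([] : List (Int × Int)), st.2)
        (st.1 ++ [inner.1], inner.2))
      (([] : List (List (Int × Int))), (0 : Int))
    res.1

-- ===== PORT B =====
-- Literal port of Source B: build the flat pair list with a step-2 range, then slice it
-- into consecutive chunks of num_days. Same raise points as A, outside Pre_.
def parse_solution_string_alt (sol_str : String) (num_employees : Int) (num_days : Int) : List (List (Int × Int)) :=
  let vals : List Int := (PySem.Str.split₀ sol_str).map (fun t => (PySem.Int.ofStr? t).getD 0)
  let expected : Int := num_employees * num_days * 2
  if (vals.length : Int) ≠ expected then []   -- Python: raise ValueError (outside Pre_)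
  else
    let pairs : List (Int × Int) := (PySem.List.pyRange 0 (vals.length : Int) 2).map
      (fun i => (PySem.List.pyGetD vals i 0, PySem.List.pyGetD vals (i + 1) 0))
    (PySem.List.pyRange 0 num_employees 1).map
      (fun e => PySem.List.slice pairs (some (e * num_days)) (some ((e + 1) * num_days)))

-- ===== PRECONDITION & SPEC =====
-- Pre_ excludes exactly the inputs where A raises ValueError: a token int() rejects, or
-- a token count different from num_employees * num_days * 2. B raises there too.
def Pre_parse_solution_string (sol_str : String) (num_employees : Int) (num_days : Int) : Prop :=
  (PySem.Str.split₀ sol_str).all (fun t => (PySem.Int.ofStr? t).isSome) = true ∧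
  (((PySem.Str.split₀ sol_str).length : Int) = num_employees * num_days * 2)
instance (sol_str : String) (num_employees : Int) (num_days : Int) : Decidable (Pre_parse_solution_string sol_str num_employees num_days) := by unfold Pre_parse_solution_string; infer_instance

def pvWitness_parse_solution_string : String × Int × Int := ("1 2 3 4", 1, 2)

def Spec_parse_solution_string (sol_str : String) (num_employees : Int) (num_days : Int) (out : List (List (Int × Int))) : Prop := out = parse_solution_string_alt sol_str num_employees num_days
instance (sol_str : String) (num_employees : Int) (num_days : Int) (out : List (List (Int × Int))) : Decidable (Spec_parse_solution_string sol_str num_employees num_days out) := by unfold Spec_parse_solution_string; infer_instance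

-- ===== CLAIM (what is proved, stated in full; the proofs are below) =====
def Claim_equal_parse_solution_string : Prop := ∀ (sol_str : String) (num_employees : Int) (num_days : Int), Dom_parse_solution_string sol_str num_employees num_days → Pre_parse_solution_string sol_str num_employees num_days → Spec_parse_solution_string sol_str num_employees num_days (parse_solution_string sol_str num_employees num_days)

-- ===== LEMMAS AND PROOFS =====

-- A's inner day loop, characterised: fold row-append with idx += 2 equals a map over range.
theorem pv_innerA (mk : Int → Int × Int) (Dn : Nat) :
    ∀ (row : List (Int × Int)) (idx : Int),
    ((PySem.List.pyRange 0 (Dn : Int) 1).foldl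
        (fun (r : List (Int × Int) × Int) _d => (r.1 ++ [mk r.2], r.2 + 2)) (row, idx))
      = (row ++ (List.range Dn).map (fun d : Nat => mk (idx + 2 * (d : Int))), idx + 2 * Dn) := by
  induction Dn with
  | zero => intro row idx; simp [PySem.List.pyRange_one_eq_nil]
  | succ n ih =>
    intro row idx
    have h : ((n : Int) + 1) = ((n + 1 : Nat) : Int) := by push_cast; ring
    rw [show ((n + 1 : Nat) : Int) = (n : Int) + 1 by push_cast; ring,
        PySem.List.pyRange_one_succ_right (by positivity),
        List.foldl_append, ih]
    simp [List.range_succ]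
    ring

-- A's outer employee loop, characterised.
theorem pv_outerA (mk : Int → Int × Int) (Dn : Nat) (En : Nat) :
    ∀ (acc : List (List (Int × Int))) (idx : Int),
    ((PySem.List.pyRange 0 (En : Int) 1).foldl
        (fun (st : List (List (Int × Int)) × Int) _e =>
          let inner := (PySem.List.pyRange 0 (Dn : Int) 1).foldl
            (fun (r : List (Int × Int) × Int) _d => (r.1 ++ [mk r.2], r.2 + 2))
            (([] : List (Int × Int)), st.2)
          (st.1 ++ [inner.1], inner.2)) (acc, idx))
      = (acc ++ (List.range En).map
            (fun e : Nat => (List.range Dn).map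
              (fun d : Nat => mk (idx + 2 * (Dn : Int) * (e : Int) + 2 * (d : Int)))),
         idx + 2 * Dn * En) := by
  induction En with
  | zero => intro acc idx; simp [PySem.List.pyRange_one_eq_nil]
  | succ n ih =>
    intro acc idx
    rw [show ((n + 1 : Nat) : Int) = (n : Int) + 1 by push_cast; ring,
        PySem.List.pyRange_one_succ_right (by positivity),
        List.foldl_append, ih]
    simp only [List.foldl_cons, List.foldl_nil, pv_innerA]
    simp [List.range_succ]
    ring

-- The step-2 range over an even bound.
theorem pv_pyRange_two (M : Nat) :
    PySem.List.pyRange 0 ((2 * M : Nat) : Int) 2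
      = (List.range M).map (fun j => ((2 * j : Nat) : Int)) := by
  rw [PySem.List.pyRange_of_pos 0 _ (by norm_num)]
  by_cases h : (0 : Int) < ((2 * M : Nat) : Int)
  · rw [if_pos h]
    have : (((2 * M : Nat) : Int) - 0 + 2 - 1) / 2 = (M : Int) := by
      push_cast; omega
    rw [this]
    simp
  · rw [if_neg h]
    have : M = 0 := by omega
    simp [this]

-- Chunk of a mapped range: take n after drop a picks indices a..a+n-1.
theorem pv_chunk {α : Type} (f : Nat → α) (a n N : Nat) (hn : a + n ≤ N) :
    (((List.range N).map f).drop a).take n = (List.range n).map (fun d => f (a + d)) := by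
  apply List.ext_getElem
  · simp; omega
  · intro i h1 h2
    simp [List.getElem_take, List.getElem_drop]

-- ===== VERDICT =====
theorem parse_solution_string_spec : Claim_equal_parse_solution_string := by
  intro sol_str E D _hdom hpre
  unfold Spec_parse_solution_string parse_solution_string parse_solution_string_alt
  obtain ⟨_hall, hlen⟩ := hpre
  set vals : List Int := (PySem.Str.split₀ sol_str).map (fun t => (PySem.Int.ofStr? t).getD 0) with hv
  have hlen' : (vals.length : Int) = E * D * 2 := by
    simpa [hv, List.length_map] using hlen
  simp only [hlen', ne_eq, not_true_eq_false, if_false]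
  set mk : Int → Int × Int := fun i => (PySem.List.pyGetD vals i 0, PySem.List.pyGetD vals (i + 1) 0) with hmk
  by_cases hE : E ≤ 0
  · -- no employees: both sides are []
    simp [PySem.List.pyRange_one_eq_nil hE]
  · replace hE : 0 < E := by omega
    have hD : 0 ≤ D := by nlinarith [Int.natCast_nonneg vals.length]
    obtain ⟨En, hEn⟩ : ∃ n : Nat, E = (n : Int) := ⟨E.toNat, by omega⟩
    obtain ⟨Dn, hDn⟩ : ∃ n : Nat, D = (n : Int) := ⟨D.toNat, by omega⟩
    have hlenN : vals.length = 2 * (En * Dn) := by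
      have : (vals.length : Int) = ((2 * (En * Dn) : Nat) : Int) := by
        rw [hlen', hEn, hDn]; push_cast; ring
      exact_mod_cast this
    subst hEn hDn
    -- A's side via the loop characterisations
    rw [pv_outerA mk Dn En]
    -- B's side: pairs and slices
    have hb : (En : Int) * (Dn : Int) * 2 = ((2 * (En * Dn) : Nat) : Int) := by push_cast; ring
    rw [hb, pv_pyRange_two (En * Dn), List.map_map, PySem.List.pyRange_one 0 (En : Int)]
    simp only [sub_zero, Int.toNat_natCast, List.map_map, zero_add, List.nil_append]
    apply List.map_congr_left
    intro en hen
    have henlt : en < En := List.mem_range.mp hen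
    have h1 : ((en : Int)) * (Dn : Int) = ((en * Dn : Nat) : Int) := by push_cast; ring
    have h2 : ((en : Int) + 1) * (Dn : Int) = (((en + 1) * Dn : Nat) : Int) := by push_cast; ring
    simp only [Function.comp_def, h1, h2, PySem.List.slice_natCast]
    have h3 : (en + 1) * Dn - en * Dn = Dn := by rw [Nat.add_mul]; omega
    rw [h3, pv_chunk _ (en * Dn) Dn (En * Dn) (by nlinarith)]
    apply List.map_congr_left
    intro d hd
    congr 1
    push_cast; ring
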